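-- pv_equiv track=rewrite | github.com/Vagacoder/Codesignal | python/Arcade/Python/P73TwoLines.py | twoLines1
-- ===== SOURCE A (Python) =====
-- from functools import partial
--
-- def line_y(m, b, x):
--     return m * x + b
--
-- def twoLines1(line1, line2, l, r):
--     line1_y = partial(line_y, line1[0], line1[1])
--     line2_y = partial(line_y, line2[0], line2[1])
--     balance = 0
--     for x in range(l, r + 1):
--         y1 = line1_y(x)
--         y2 = line2_y(x)
--         if y1 > y2:
--             balance += 1
--         elif y1 < y2:
--             balance -= 1
--     if balance > 0:
--         return "first"
--     if balance < 0:
--         return "second"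
--     return "any"
-- ===== SOURCE B (Python) =====
-- def _count_ge(l, r, x0):
--     # number of integers x with l <= x <= r and x0 <= x
--     return max(0, r - max(l, x0) + 1)
--
-- def _count_le(l, r, x1):
--     # number of integers x with l <= x <= r and x <= x1
--     return max(0, min(r, x1) - l + 1)
--
-- def twoLines1(line1, line2, l, r):
--     a = line1[0] - line2[0]
--     c = line1[1] - line2[1]
--     if l > r or (a == 0 and c == 0):
--         return "any"
--     if a == 0:
--         return "first" if c > 0 else "second"
--     if a > 0:
--         pos = _count_ge(l, r, (-c) // a + 1)
--         neg = _count_le(l, r, (-c - 1) // a)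
--     else:
--         pos = _count_le(l, r, (c - 1) // (-a))
--         neg = _count_ge(l, r, c // (-a) + 1)
--     if pos > neg:
--         return "first"
--     if pos < neg:
--         return "second"
--     return "any"
-- ===== Notes on version B (the rewrite author's own statement) =====
-- stated objective: alternative
-- what changed: Replaces the per-integer comparison loop over range(l, r+1) with a closed-form count: the integers of [l,r] on each side of the crossing point of the difference line a*x+c are counted via floor-division thresholds and the two counts compared.
import Mathlib
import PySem

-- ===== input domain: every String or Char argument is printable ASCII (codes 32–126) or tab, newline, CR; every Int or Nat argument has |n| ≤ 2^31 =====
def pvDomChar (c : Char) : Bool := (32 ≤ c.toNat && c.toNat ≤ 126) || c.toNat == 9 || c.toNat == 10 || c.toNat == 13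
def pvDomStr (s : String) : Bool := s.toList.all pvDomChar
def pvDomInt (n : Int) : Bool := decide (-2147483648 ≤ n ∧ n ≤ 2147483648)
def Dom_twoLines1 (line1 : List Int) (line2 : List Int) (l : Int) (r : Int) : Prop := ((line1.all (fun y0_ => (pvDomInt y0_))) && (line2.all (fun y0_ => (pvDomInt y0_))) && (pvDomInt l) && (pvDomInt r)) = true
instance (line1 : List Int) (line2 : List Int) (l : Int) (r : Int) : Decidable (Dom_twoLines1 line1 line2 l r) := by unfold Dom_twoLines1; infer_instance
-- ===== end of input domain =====

-- B replaces A's per-integer comparison loop with a closed form: it counts, via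
-- floor-division thresholds, the integers of [l,r] on each side of the crossing point.

-- ===== PORT A =====
-- line_y(m, b, x) = m * x + b
def lineY (m b x : Int) : Int := m * x + b

-- the 'for x in range(l, r+1)' accumulation of balance
def balanceLoop (m1 b1 m2 b2 : Int) (L : List Int) : Int :=
  L.foldl (fun bal x =>
    if lineY m1 b1 x > lineY m2 b2 x then bal + 1
    else if lineY m1 b1 x < lineY m2 b2 x then bal - 1
    else bal) 0

def twoLines1 (line1 : List Int) (line2 : List Int) (l : Int) (r : Int) : String :=
  match PySem.List.pyGet? line1 0, PySem.List.pyGet? line1 1,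
        PySem.List.pyGet? line2 0, PySem.List.pyGet? line2 1 with
  | some m1, some b1, some m2, some b2 =>
    let balance := balanceLoop m1 b1 m2 b2 (PySem.List.pyRange l (r + 1) 1)
    if balance > 0 then "first"
    else if balance < 0 then "second"
    else "any"
  | _, _, _, _ => ""    -- IndexError in Python: excluded by Pre_twoLines1

-- ===== PORT B =====
def countGe (l r x0 : Int) : Int := max 0 (r - max l x0 + 1)
def countLe (l r x1 : Int) : Int := max 0 (min r x1 - l + 1)

def twoLines1_alt (line1 : List Int) (line2 : List Int) (l : Int) (r : Int) : String :=
  match PySem.List.pyGet? line1 0 with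
  | none => ""    -- IndexError in Python: excluded by Pre_twoLines1
  | some m1 =>
  match PySem.List.pyGet? line1 1 with
  | none => ""
  | some b1 =>
  match PySem.List.pyGet? line2 0 with
  | none => ""
  | some m2 =>
  match PySem.List.pyGet? line2 1 with
  | none => ""
  | some b2 =>
    let a := m1 - m2
    let c := b1 - b2
    if l > r ∨ (a = 0 ∧ c = 0) then "any"
    else if a = 0 then (if c > 0 then "first" else "second")
    else
      let pos := if a > 0 then countGe l r (PySem.Int.floordiv (-c) a + 1)
                 else countLe l r (PySem.Int.floordiv (c - 1) (-a))
      let neg := if a > 0 then countLe l r (PySem.Int.floordiv (-c - 1) a)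
                 else countGe l r (PySem.Int.floordiv c (-a) + 1)
      if pos > neg then "first"
      else if pos < neg then "second"
      else "any"

-- ===== PRECONDITION & SPEC =====
-- Pre_ excludes only inputs on which A raises IndexError (a line with fewer than 2 coefficients).
def Pre_twoLines1 (line1 : List Int) (line2 : List Int) (l : Int) (r : Int) : Prop :=
  2 ≤ line1.length ∧ 2 ≤ line2.length
instance (line1 : List Int) (line2 : List Int) (l : Int) (r : Int) : Decidable (Pre_twoLines1 line1 line2 l r) := by unfold Pre_twoLines1; infer_instance

def pvWitness_twoLines1 : List Int × List Int × Int × Int := ([1, 2], [3, -1], -2, 5)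

def Spec_twoLines1 (line1 : List Int) (line2 : List Int) (l : Int) (r : Int) (out : String) : Prop := out = twoLines1_alt line1 line2 l r
instance (line1 : List Int) (line2 : List Int) (l : Int) (r : Int) (out : String) : Decidable (Spec_twoLines1 line1 line2 l r out) := by unfold Spec_twoLines1; infer_instance

-- ===== CLAIM (what is proved, stated in full; the proofs are below) =====
def Claim_equal_twoLines1 : Prop := ∀ (line1 : List Int) (line2 : List Int) (l : Int) (r : Int), Dom_twoLines1 line1 line2 l r → Pre_twoLines1 line1 line2 l r → Spec_twoLines1 line1 line2 l r (twoLines1 line1 line2 l r)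

-- ===== LEMMAS AND PROOFS =====

-- the per-step contribution of x to A's balance, for the difference line a*x + c
def sgnTerm (a c x : Int) : Int := if 0 < a * x + c then 1 else if a * x + c < 0 then -1 else 0

theorem foldl_balance (m1 b1 m2 b2 : Int) (L : List Int) (init : Int) :
    L.foldl (fun bal x =>
      if lineY m1 b1 x > lineY m2 b2 x then bal + 1
      else if lineY m1 b1 x < lineY m2 b2 x then bal - 1
      else bal) init
    = init + (L.map (sgnTerm (m1 - m2) (b1 - b2))).sum := by
  induction L generalizing init with
  | nil => simp
  | cons x t ih =>
    have hd : (m1 - m2) * x + (b1 - b2) = lineY m1 b1 x - lineY m2 b2 x := by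
      simp only [lineY]; ring
    simp only [List.foldl_cons, List.map_cons, List.sum_cons, ih, sgnTerm, hd, gt_iff_lt]
    split_ifs <;> omega

theorem balanceLoop_eq (m1 b1 m2 b2 : Int) (L : List Int) :
    balanceLoop m1 b1 m2 b2 L = (L.map (sgnTerm (m1 - m2) (b1 - b2))).sum := by
  unfold balanceLoop
  rw [foldl_balance]
  omega

theorem sum_sgnTerm (a c : Int) (L : List Int) :
    (L.map (sgnTerm a c)).sum
    = ((L.countP (fun x => decide (0 < a * x + c)) : Int))
      - ((L.countP (fun x => decide (a * x + c < 0)) : Int)) := by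
  induction L with
  | nil => simp
  | cons x t ih =>
    simp only [List.map_cons, List.sum_cons, List.countP_cons, ih, sgnTerm]
    rcases lt_trichotomy (a * x + c) 0 with h | h | h
    · have h1 : ¬ (0 < a * x + c) := by omega
      simp only [h, h1, decide_true, decide_false, if_true, if_false]
      push_cast
      omega
    · have h1 : ¬ (0 < a * x + c) := by omega
      have h2 : ¬ (a * x + c < 0) := by omega
      simp only [h1, h2, decide_false, if_false]
      push_cast
      omega
    · have h2 : ¬ (a * x + c < 0) := by omega
      simp only [h, h2, decide_true, decide_false, if_true, if_false]
      push_cast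
      omega

-- count of x in range(l, r+1) with x0 ≤ x, in closed form
theorem countP_range_ge (l r x0 : Int) :
    ((PySem.List.pyRange l (r + 1) 1).countP (fun x => decide (x0 ≤ x)) : Int)
    = countGe l r x0 := by
  rw [PySem.List.pyRange_one]
  have key : ∀ (n : Nat) (l : Int),
      ((List.map (fun (k : Nat) => l + (k : Int)) (List.range n)).countP (fun x => decide (x0 ≤ x)) : Int)
      = max 0 (min (n : Int) (l + n - x0)) := by
    intro n
    induction n with
    | zero => intro l; simp
    | succ m ih =>
      intro l
      rw [List.range_succ, List.map_append, List.countP_append]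
      simp only [List.map_cons, List.map_nil, List.countP_cons, List.countP_nil]
      by_cases h : x0 ≤ l + (m : Int)
      · simp only [h, decide_true]
        push_cast [ih l]
        omega
      · simp only [h, decide_false]
        push_cast [ih l]
        omega
  rw [key ((r + 1 - l).toNat) l]
  unfold countGe
  omega

-- count of x in range(l, r+1) with x ≤ x1, in closed form
theorem countP_range_le (l r x1 : Int) :
    ((PySem.List.pyRange l (r + 1) 1).countP (fun x => decide (x ≤ x1)) : Int)
    = countLe l r x1 := by
  rw [PySem.List.pyRange_one]
  have key : ∀ (n : Nat) (l : Int),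
      ((List.map (fun (k : Nat) => l + (k : Int)) (List.range n)).countP (fun x => decide (x ≤ x1)) : Int)
      = max 0 (min (n : Int) (x1 - l + 1)) := by
    intro n
    induction n with
    | zero => intro l; simp
    | succ m ih =>
      intro l
      rw [List.range_succ, List.map_append, List.countP_append]
      simp only [List.map_cons, List.map_nil, List.countP_cons, List.countP_nil]
      by_cases h : l + (m : Int) ≤ x1
      · simp only [h, decide_true]
        push_cast [ih l]
        omega
      · simp only [h, decide_false]
        push_cast [ih l]
        omega
  rw [key ((r + 1 - l).toNat) l]
  unfold countLe
  omega

theorem pos_iff_of_pos (a c x : Int) (ha : 0 < a) :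
    (0 < a * x + c) ↔ (PySem.Int.floordiv (-c) a + 1 ≤ x) := by
  have h := @PySem.Int.le_floordiv_iff_mul_le (-c) a x ha
  have hc : x * a = a * x := mul_comm x a
  constructor
  · intro h0
    by_contra hlt
    have hx : x ≤ PySem.Int.floordiv (-c) a := by omega
    have := h.mp hx
    linarith
  · intro hx
    by_contra h0
    have hle : x * a ≤ -c := by linarith
    have := h.mpr hle
    omega

theorem neg_iff_of_pos (a c x : Int) (ha : 0 < a) :
    (a * x + c < 0) ↔ (x ≤ PySem.Int.floordiv (-c - 1) a) := by
  have h := @PySem.Int.le_floordiv_iff_mul_le (-c - 1) a x ha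
  have hc : x * a = a * x := mul_comm x a
  constructor
  · intro h0
    exact h.mpr (by linarith)
  · intro hx
    have := h.mp hx
    linarith

theorem pos_iff_of_neg (a c x : Int) (ha : a < 0) :
    (0 < a * x + c) ↔ (x ≤ PySem.Int.floordiv (c - 1) (-a)) := by
  have h := @PySem.Int.le_floordiv_iff_mul_le (c - 1) (-a) x (by omega)
  have hc : x * -a = -(a * x) := by ring
  constructor
  · intro h0
    exact h.mpr (by linarith)
  · intro hx
    have := h.mp hx
    linarith

theorem neg_iff_of_neg (a c x : Int) (ha : a < 0) :
    (a * x + c < 0) ↔ (PySem.Int.floordiv c (-a) + 1 ≤ x) := by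
  have h := @PySem.Int.le_floordiv_iff_mul_le c (-a) x (by omega)
  have hc : x * -a = -(a * x) := by ring
  constructor
  · intro h0
    by_contra hlt
    have hx : x ≤ PySem.Int.floordiv c (-a) := by omega
    have := h.mp hx
    linarith
  · intro hx
    by_contra h0
    have hle : x * -a ≤ c := by linarith
    have := h.mpr hle
    omega

theorem countP_congr' {L : List Int} {p q : Int → Bool} (h : ∀ x, p x = q x) :
    L.countP p = L.countP q := by
  induction L with
  | nil => rfl
  | cons x t ih => simp [List.countP_cons, ih, h x]

-- ===== VERDICT (by name: the statement is the Claim_ definition above) =====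
theorem twoLines1_spec : Claim_equal_twoLines1 := by
  intro line1 line2 l r _hdom hpre
  unfold Spec_twoLines1
  obtain ⟨h1, h2⟩ := hpre
  rcases line1 with _ | ⟨m1, _ | ⟨b1, t1⟩⟩ <;> simp only [List.length_nil, List.length_cons] at h1
  · omega
  · omega
  rcases line2 with _ | ⟨m2, _ | ⟨b2, t2⟩⟩ <;> simp only [List.length_nil, List.length_cons] at h2
  · omega
  · omega
  have g10 : PySem.List.pyGet? (m1 :: b1 :: t1) 0 = some m1 := by
    have h : (0:Int) ≤ (t1.length : Int) + 1 := by positivity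
    simp [PySem.List.pyGet?, PySem.List.pyIdx?, h]
  have g11 : PySem.List.pyGet? (m1 :: b1 :: t1) 1 = some b1 := by
    simp [PySem.List.pyGet?, PySem.List.pyIdx?]
  have g20 : PySem.List.pyGet? (m2 :: b2 :: t2) 0 = some m2 := by
    have h : (0:Int) ≤ (t2.length : Int) + 1 := by positivity
    simp [PySem.List.pyGet?, PySem.List.pyIdx?, h]
  have g21 : PySem.List.pyGet? (m2 :: b2 :: t2) 1 = some b2 := by
    simp [PySem.List.pyGet?, PySem.List.pyIdx?]
  unfold twoLines1 twoLines1_alt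
  rw [g10, g11, g20, g21]
  simp only
  set a := m1 - m2 with hadef
  set c := b1 - b2 with hcdef
  set L := PySem.List.pyRange l (r + 1) 1 with hL
  have hbal : balanceLoop m1 b1 m2 b2 L
      = ((L.countP (fun x => decide (0 < a * x + c)) : Int))
        - ((L.countP (fun x => decide (a * x + c < 0)) : Int)) := by
    rw [balanceLoop_eq, sum_sgnTerm]
  rw [hbal]
  by_cases hemp : l > r ∨ (a = 0 ∧ c = 0)
  · -- balance is 0: empty range or identical lines
    rw [if_pos hemp]
    have hz : (L.countP (fun x => decide (0 < a * x + c)))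
        = (L.countP (fun x => decide (a * x + c < 0))) := by
      rcases hemp with hlr | ⟨ha0, hc0⟩
      · have hnil : L = [] := PySem.List.pyRange_one_eq_nil (by omega)
        rw [hnil]; rfl
      · apply countP_congr'
        intro x; simp [ha0, hc0]
    rw [hz]
    simp
  · rw [if_neg hemp]
    rw [not_or, not_lt] at hemp
    obtain ⟨hlr, hnboth⟩ := hemp
    by_cases ha0 : a = 0
    · -- constant difference c ≠ 0 over a nonempty range
      rw [if_pos ha0]
      have hc0 : c ≠ 0 := fun hc => hnboth ⟨ha0, hc⟩
      have hlen : ((r + 1 - l) : Int) = (L.length : Int) := by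
        rw [hL, PySem.List.length_pyRange_one]; omega
      by_cases hcpos : c > 0
      · have hpc : (L.countP (fun x => decide (0 < a * x + c))) = L.length := by
          rw [List.countP_eq_length]
          intro x _; simp only [ha0, Int.zero_mul, Int.zero_add]; simpa using hcpos
        have hnc : (L.countP (fun x => decide (a * x + c < 0))) = 0 := by
          rw [List.countP_eq_zero]
          intro x _; simp only [ha0, Int.zero_mul, Int.zero_add]; simpa using (by omega : ¬ (c < 0))
        rw [hpc, hnc, if_pos hcpos, if_pos (by push_cast; omega)]
      · have hcneg : c < 0 := by omega
        have hpc : (L.countP (fun x => decide (0 < a * x + c))) = 0 := by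
          rw [List.countP_eq_zero]
          intro x _; simp only [ha0, Int.zero_mul, Int.zero_add]; simpa using (by omega : ¬ (0 < c))
        have hnc : (L.countP (fun x => decide (a * x + c < 0))) = L.length := by
          rw [List.countP_eq_length]
          intro x _; simp only [ha0, Int.zero_mul, Int.zero_add]; simpa using hcneg
        rw [hpc, hnc, if_neg hcpos, if_neg (by push_cast; omega), if_pos (by push_cast; omega)]
    · rw [if_neg ha0]
      by_cases hapos : a > 0
      · have hpos : ((L.countP (fun x => decide (0 < a * x + c)) : Int))
            = countGe l r (PySem.Int.floordiv (-c) a + 1) := by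
          have hcong : ∀ y : Int, (decide (0 < a * y + c)) = (decide (PySem.Int.floordiv (-c) a + 1 ≤ y)) := by
            intro y; rw [decide_eq_decide]; exact pos_iff_of_pos a c y hapos
          rw [countP_congr' hcong, hL]
          exact countP_range_ge l r _
        have hneg : ((L.countP (fun x => decide (a * x + c < 0)) : Int))
            = countLe l r (PySem.Int.floordiv (-c - 1) a) := by
          have hcong : ∀ y : Int, (decide (a * y + c < 0)) = (decide (y ≤ PySem.Int.floordiv (-c - 1) a)) := by
            intro y; rw [decide_eq_decide]; exact neg_iff_of_pos a c y hapos
          rw [countP_congr' hcong, hL]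
          exact countP_range_le l r _
        rw [hpos, hneg, if_pos hapos, if_pos hapos]
        split_ifs <;> first | rfl | omega
      · have haneg : a < 0 := by omega
        have hpos : ((L.countP (fun x => decide (0 < a * x + c)) : Int))
            = countLe l r (PySem.Int.floordiv (c - 1) (-a)) := by
          have hcong : ∀ y : Int, (decide (0 < a * y + c)) = (decide (y ≤ PySem.Int.floordiv (c - 1) (-a))) := by
            intro y; rw [decide_eq_decide]; exact pos_iff_of_neg a c y haneg
          rw [countP_congr' hcong, hL]
          exact countP_range_le l r _
        have hneg : ((L.countP (fun x => decide (a * x + c < 0)) : Int))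
            = countGe l r (PySem.Int.floordiv c (-a) + 1) := by
          have hcong : ∀ y : Int, (decide (a * y + c < 0)) = (decide (PySem.Int.floordiv c (-a) + 1 ≤ y)) := by
            intro y; rw [decide_eq_decide]; exact neg_iff_of_neg a c y haneg
          rw [countP_congr' hcong, hL]
          exact countP_range_ge l r _
        rw [hpos, hneg, if_neg hapos, if_neg hapos]
        split_ifs <;> first | rfl | omega
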